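-- pv_equiv track=rewrite | github.com/tiubak/ai-trendings | api/2026-02-21-ai-dungeon-master.py | parse_scene_and_choices
-- ===== SOURCE A (Python) =====
-- def parse_scene_and_choices(text: str):
--     """Parse generated text into scene and choices"""
--     lines = [l.strip() for l in text.split('\n') if l.strip()]
--     scene_lines, choices, in_choices = [], [], False
--     for line in lines:
--         if line.lower().startswith(("choices:", "options:")):
--             in_choices = True
--             continue
--         if in_choices:
--             if line and line[0].isdigit() and ". " in line:
--                 choices.append(line.split(". ", 1)[-1])
--         else:
--             scene_lines.append(line)
--     return "\n".join(scene_lines), choices if choices else ["Explore ahead", "Investigate nearby", "Rest"]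
-- ===== SOURCE B (Python) =====
-- def parse_scene_and_choices(text: str):
--     """Parse generated text into scene and choices"""
--     lines = [l.strip() for l in text.split('\n') if l.strip()]
--     idx = next((i for i, l in enumerate(lines)
--                 if l.lower().startswith(("choices:", "options:"))), None)
--     if idx is None:
--         return "\n".join(lines), ["Explore ahead", "Investigate nearby", "Rest"]
--     choices = [l.split(". ", 1)[-1]
--                for l in lines[idx + 1:] if l[0].isdigit() and ". " in l]
--     return "\n".join(lines[:idx]), choices or ["Explore ahead", "Investigate nearby", "Rest"]
-- ===== Notes on version B (the rewrite author's own statement) =====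
-- stated objective: simpler
-- what changed: B replaces A's stateful single pass with an in_choices flag by locating the first marker line once (findIdx-style) and then building the scene from the lines before it and the choices by a filter-map over the lines after it.
import Mathlib
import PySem

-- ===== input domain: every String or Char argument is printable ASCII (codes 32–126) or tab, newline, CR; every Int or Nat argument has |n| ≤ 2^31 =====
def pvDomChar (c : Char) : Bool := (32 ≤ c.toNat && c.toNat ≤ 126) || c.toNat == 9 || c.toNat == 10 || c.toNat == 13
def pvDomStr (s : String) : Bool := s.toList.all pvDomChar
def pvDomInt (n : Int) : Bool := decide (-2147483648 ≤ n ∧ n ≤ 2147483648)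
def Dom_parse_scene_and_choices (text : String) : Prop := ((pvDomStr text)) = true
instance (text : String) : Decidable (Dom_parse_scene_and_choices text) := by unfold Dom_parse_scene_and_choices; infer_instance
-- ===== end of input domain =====

-- B locates the first marker line once and builds scene/choices by take/drop + filter-map,
-- instead of A's stateful single pass; objective: simpler, same cost.

-- ===== PORT A =====

-- l.lower().startswith(("choices:", "options:"))
def pvMarker (l : String) : Bool :=
  PySem.Str.startswith (PySem.Str.lower l) "choices:" || PySem.Str.startswith (PySem.Str.lower l) "options:"

-- line and line[0].isdigit() and ". " in line
def pvKeepA (l : String) : Bool :=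
  match l.toList with
  | [] => false
  | c :: _ => PySem.Chars.isdigit c && PySem.Str.isIn ". " l

-- line.split(". ", 1)[-1]
def pvExt (l : String) : String :=
  ((PySem.Str.splitMax? l ". " 1).getD []).getLastD ""

-- [l.strip() for l in text.split('\n') if l.strip()]
def pvLines (text : String) : List String :=
  (((PySem.Str.split? text "\n").getD []).map PySem.Str.strip).filter (fun s => s ≠ "")

-- A's for-loop with state (scene_lines, choices, in_choices)
def pvLoopA : List String → List String → List String → Bool → List String × List String
  | [], scene, choices, _ => (scene, choices)
  | l :: rest, scene, choices, inC =>
    if pvMarker l then pvLoopA rest scene choices true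
    else if inC then
      if pvKeepA l then pvLoopA rest scene (choices ++ [pvExt l]) inC
      else pvLoopA rest scene choices inC
    else pvLoopA rest (scene ++ [l]) choices inC

def parse_scene_and_choices (text : String) : String × List String :=
  let (scene, choices) := pvLoopA (pvLines text) [] [] false
  (PySem.Str.join "\n" scene,
   if choices = [] then ["Explore ahead", "Investigate nearby", "Rest"] else choices)

-- ===== PORT B =====

-- l[0].isdigit() and ". " in l  (l[0] never raises in B: every line is stripped nonempty)
def pvKeepB (l : String) : Bool :=
  (PySem.Str.pyGet? l 0).elim false PySem.Chars.isdigit && PySem.Str.isIn ". " l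

def parse_scene_and_choices_alt (text : String) : String × List String :=
  let lines := pvLines text
  match lines.findIdx? pvMarker with
  | none => (PySem.Str.join "\n" lines, ["Explore ahead", "Investigate nearby", "Rest"])
  | some idx =>
    let choices := ((lines.drop (idx + 1)).filter pvKeepB).map pvExt
    (PySem.Str.join "\n" (lines.take idx),
     if choices = [] then ["Explore ahead", "Investigate nearby", "Rest"] else choices)

-- ===== PRECONDITION & SPEC =====
def Spec_parse_scene_and_choices (text : String) (out : String × List String) : Prop := out = parse_scene_and_choices_alt text
instance (text : String) (out : String × List String) : Decidable (Spec_parse_scene_and_choices text out) := by unfold Spec_parse_scene_and_choices; infer_instance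

-- ===== CLAIM (what is proved, stated in full; the proofs are below) =====
def Claim_equal_parse_scene_and_choices : Prop := ∀ (text : String), Dom_parse_scene_and_choices text → Spec_parse_scene_and_choices text (parse_scene_and_choices text)

-- ===== LEMMAS AND PROOFS =====

theorem pvKeep_eq (l : String) : pvKeepA l = pvKeepB l := by
  unfold pvKeepA pvKeepB
  cases hl : l.toList <;> simp [PySem.Str.pyGet?, PySem.Chars.pyGet?, PySem.List.pyGet?, PySem.List.pyIdx?, hl]

-- a marker line's first character is 'c'/'C'/'o'/'O', never a digit
theorem pv_lower_not_digit (c x : Char) (hx : 'a' ≤ x) (h : PySem.Chars.lowerChar c = x) :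
    PySem.Chars.isdigit c = false := by
  simp [PySem.Chars.lowerChar, PySem.Chars.isupper] at h
  simp [PySem.Chars.isdigit]
  intro h0
  split at h
  · next hup => exact lt_of_lt_of_le (by decide) hup.1
  · subst h; exact lt_of_lt_of_le (by decide) hx

theorem pvMarker_not_keepA (l : String) (h : pvMarker l = true) : pvKeepA l = false := by
  unfold pvKeepA
  cases hl : l.toList with
  | nil => simp
  | cons c rest =>
    have hc : PySem.Chars.lowerChar c = 'c' ∨ PySem.Chars.lowerChar c = 'o' := by
      unfold pvMarker at h
      rcases Bool.or_eq_true_iff.mp h with h' | h'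
      · left
        rw [PySem.Str.startswith_eq, PySem.Str.toList_lower] at h'
        have hp := (PySem.Chars.startswith_iff _ _).mp h'
        rw [hl] at hp
        obtain ⟨t, ht⟩ := hp
        simp [PySem.Chars.lower] at ht
        exact ht.1.symm
      · right
        rw [PySem.Str.startswith_eq, PySem.Str.toList_lower] at h'
        have hp := (PySem.Chars.startswith_iff _ _).mp h'
        rw [hl] at hp
        obtain ⟨t, ht⟩ := hp
        simp [PySem.Chars.lower] at ht
        exact ht.1.symm
    simp only [Bool.and_eq_false_iff]
    left
    rcases hc with hc | hc <;> exact pv_lower_not_digit c _ (by decide) hc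

theorem pvLoopA_true (lines scene choices : List String) :
    pvLoopA lines scene choices true = (scene, choices ++ (lines.filter pvKeepA).map pvExt) := by
  induction lines generalizing choices with
  | nil => simp [pvLoopA]
  | cons l rest ih =>
    by_cases hm : pvMarker l = true
    · simp [pvLoopA, hm, pvMarker_not_keepA l hm, ih]
    · simp at hm
      by_cases hk : pvKeepA l = true <;> simp [pvLoopA, hm, hk, ih]

theorem pvLoopA_false (lines scene choices : List String) :
    pvLoopA lines scene choices false =
      match lines.findIdx? pvMarker with
      | none => (scene ++ lines, choices)
      | some i => (scene ++ lines.take i,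
          choices ++ ((lines.drop (i + 1)).filter pvKeepA).map pvExt) := by
  induction lines generalizing scene with
  | nil => simp [pvLoopA]
  | cons l rest ih =>
    by_cases hm : pvMarker l = true
    · simp [pvLoopA, hm, List.findIdx?_cons, pvLoopA_true]
    · simp at hm
      simp only [pvLoopA, hm, if_false, Bool.false_eq_true, ih, List.findIdx?_cons]
      cases hf : rest.findIdx? pvMarker <;> simp [List.append_assoc]

-- ===== VERDICT (by name: the statement is the Claim_ definition above) =====
theorem parse_scene_and_choices_spec : Claim_equal_parse_scene_and_choices := by
  intro text _
  unfold Spec_parse_scene_and_choices parse_scene_and_choices parse_scene_and_choices_alt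
  rw [pvLoopA_false]
  cases hf : (pvLines text).findIdx? pvMarker with
  | none => simp [hf]
  | some i =>
    simp only [hf, List.nil_append]
    rw [List.filter_congr (fun l _ => (pvKeep_eq l))]
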